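-- pv_equiv track=rewrite | github.com/Mayank-711/OCR-Based-Answer-Sheet-Checking-Automation | auto_checker/checker_app/utils/scoring.py | score_debug
-- ===== SOURCE A (Python) =====
-- def score_debug(student_answers: dict, answer_key: dict) -> int:
--     """
--     Score debug sheet.
--     Correct error identification = 1 point.
--     Correct output = 2 points.
--     Total per question = 3 points.
--     """
--     score = 0
--     # Find all question numbers in the answer key
--     q_nums = set()
--     for label in answer_key:
--         if '_ERROR' in label or '_OUTPUT' in label:
--             try:
--                 q = int(label.replace('Q', '').split('_')[0])
--                 q_nums.add(q)
--             except ValueError: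
--                 continue
--
--     for q in sorted(q_nums):
--         error_key = f"Q{q}_ERROR"
--         output_key = f"Q{q}_OUTPUT"
--
--         # Check error identification (fuzzy match — check if key terms overlap)
--         if error_key in answer_key and error_key in student_answers:
--             if _fuzzy_match(student_answers[error_key], answer_key[error_key]):
--                 score += 1
--
--         # Check correct output
--         if output_key in answer_key and output_key in student_answers:
--             if _fuzzy_match(student_answers[output_key], answer_key[output_key]):
--                 score += 2
--
--     return score
--
-- def _fuzzy_match(student_text: str, key_text: str) -> bool:
--     """Simple fuzzy matching — check if key terms from answer key appear in student answer."""
--     student_lower = student_text.lower().strip()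
--     key_lower = key_text.lower().strip()
--
--     # Exact match
--     if student_lower == key_lower:
--         return True
--
--     # Check if significant words from key appear in student answer
--     key_words = {w for w in key_lower.split() if len(w) > 2}
--     if not key_words:
--         return student_lower == key_lower
--
--     matches = sum(1 for w in key_words if w in student_lower)
--     return matches / len(key_words) >= 0.6
-- ===== SOURCE B (Python) =====
-- def score_debug(student_answers: dict, answer_key: dict) -> int:
--     """
--     Score debug sheet in a single pass over the answer key labels,
--     deduplicating question numbers with a `seen` set (no set-building
--     pre-pass, no sort: the total is a sum, so order does not matter).
--     """
--     score = 0
--     seen = set()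
--     for label in answer_key:
--         if '_ERROR' not in label and '_OUTPUT' not in label:
--             continue
--         try:
--             q = int(label.replace('Q', '').split('_')[0])
--         except ValueError:
--             continue
--         if q in seen:
--             continue
--         seen.add(q)
--         error_key = f"Q{q}_ERROR"
--         output_key = f"Q{q}_OUTPUT"
--         score += (1 if error_key in answer_key and error_key in student_answers
--                   and _fuzzy_match(student_answers[error_key], answer_key[error_key]) else 0) \
--                + (2 if output_key in answer_key and output_key in student_answers
--                   and _fuzzy_match(student_answers[output_key], answer_key[output_key]) else 0)
--     return score
--
-- def _fuzzy_match(student_text: str, key_text: str) -> bool: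
--     """Simple fuzzy matching — check if key terms from answer key appear in student answer."""
--     student_lower = student_text.lower().strip()
--     key_lower = key_text.lower().strip()
--
--     # Exact match
--     if student_lower == key_lower:
--         return True
--
--     # Check if significant words from key appear in student answer
--     key_words = {w for w in key_lower.split() if len(w) > 2}
--     if not key_words:
--         return student_lower == key_lower
--
--     matches = sum(1 for w in key_words if w in student_lower)
--     return matches / len(key_words) >= 0.6
-- ===== Notes on version B (the rewrite author's own statement) =====
-- stated objective: simpler
-- what changed: B replaces A's two-phase scheme (build a set of question numbers from the labels, sort it, then a second loop that scores each number) by one pass over the answer-key labels with a `seen` set, scoring each question number the first time it is parsed; the sort disappears because the score is an order-independent sum.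
import Mathlib
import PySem

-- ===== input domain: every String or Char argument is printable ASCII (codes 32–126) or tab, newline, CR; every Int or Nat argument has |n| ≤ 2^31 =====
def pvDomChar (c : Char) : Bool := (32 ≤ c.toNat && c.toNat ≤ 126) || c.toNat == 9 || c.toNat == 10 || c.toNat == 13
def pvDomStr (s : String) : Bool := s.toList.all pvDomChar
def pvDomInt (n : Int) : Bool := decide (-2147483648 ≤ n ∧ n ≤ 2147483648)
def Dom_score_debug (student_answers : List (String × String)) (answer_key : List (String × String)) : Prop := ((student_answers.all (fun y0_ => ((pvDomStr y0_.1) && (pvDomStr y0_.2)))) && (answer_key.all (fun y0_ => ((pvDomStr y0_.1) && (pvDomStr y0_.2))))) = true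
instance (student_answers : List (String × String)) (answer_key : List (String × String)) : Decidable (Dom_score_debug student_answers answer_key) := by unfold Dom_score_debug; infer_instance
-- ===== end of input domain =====

-- B replaces A's two-phase scheme (collect question numbers into a set, sort, then score) by a
-- single pass over the answer-key labels with a `seen` set (objective: simpler; return value only).

-- ===== PORT A =====
-- shared helpers first: both Pythons contain these identical code fragments
-- f"Q{q}<suf>"
def pvFstring (q : Int) (suf : String) : String := PySem.Str.join "" ["Q", PySem.Int.toStr q, suf]

-- _fuzzy_match, identical in Source A and Source B.  `matches / len(key_words) >= 0.6` is float
-- arithmetic in Python; `3 * len ≤ 5 * matches` has the same truth value for every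
-- key-word count reachable here (the rational gap 1/(5n) dwarfs the double rounding error).
def pvFuzzy (student_text : String) (key_text : String) : Bool :=
  let student_lower := PySem.Str.strip (PySem.Str.lower student_text)
  let key_lower := PySem.Str.strip (PySem.Str.lower key_text)
  if student_lower == key_lower then true
  else
    let key_words : PySem.Set String :=
      PySem.Set.ofList ((PySem.Str.split₀ key_lower).filter (fun w => 2 < PySem.Str.len w))
    if key_words.isEmpty then student_lower == key_lower
    else
      let nmatch := (key_words.filter (fun w => PySem.Str.isIn w student_lower)).length
      decide (3 * key_words.length ≤ 5 * nmatch)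

-- the label test + `int(label.replace('Q','').split('_')[0])`; none = label skipped (ValueError)
-- (split with a non-empty separator never returns [], so the `headD ""` default is unreachable)
def pvParseQ (label : String) : Option Int :=
  if PySem.Str.isIn "_ERROR" label || PySem.Str.isIn "_OUTPUT" label then
    match PySem.Str.split? (PySem.Str.replace label "Q" "") "_" with
    | some parts => PySem.Int.ofStr? (parts.headD "")
    | none => none
  else none

-- A's first loop: `for label in answer_key: … q_nums.add(q)`
def pvQNumsA : List String → PySem.Set Int → PySem.Set Int
  | [], s => s
  | label :: rest, s =>
      pvQNumsA rest (match pvParseQ label with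
        | some q => PySem.Set.add s q
        | none => s)

-- A's second loop: `for q in sorted(q_nums): …` with the two guarded score updates
def pvScoreLoopA (saD : PySem.Dict String String) (akD : PySem.Dict String String) :
    List Int → Int → Int
  | [], score => score
  | q :: rest, score =>
      pvScoreLoopA saD akD rest
        (let error_key := pvFstring q "_ERROR"
         let output_key := pvFstring q "_OUTPUT"
         let score := if akD.contains error_key && saD.contains error_key then
             (if pvFuzzy (saD.getD error_key "") (akD.getD error_key "") then score + 1 else score)
           else score
         if akD.contains output_key && saD.contains output_key then
           (if pvFuzzy (saD.getD output_key "") (akD.getD output_key "") then score + 2 else score)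
         else score)

def score_debug (student_answers : List (String × String)) (answer_key : List (String × String)) : Int :=
  pvScoreLoopA (PySem.Dict.ofList student_answers) (PySem.Dict.ofList answer_key)
    (PySem.List.sorted (pvQNumsA (PySem.Dict.ofList answer_key).keys PySem.Set.empty)
      (fun x => x) false) 0

-- ===== PORT B =====
-- B's per-question points: (1 if … else 0) + (2 if … else 0)
def pvScore1 (saD : PySem.Dict String String) (akD : PySem.Dict String String) (q : Int) : Int :=
  let error_key := pvFstring q "_ERROR"
  let output_key := pvFstring q "_OUTPUT"
  (if akD.contains error_key && saD.contains error_key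
      && pvFuzzy (saD.getD error_key "") (akD.getD error_key "") then 1 else 0)
  + (if akD.contains output_key && saD.contains output_key
      && pvFuzzy (saD.getD output_key "") (akD.getD output_key "") then 2 else 0)

-- B's single loop over the labels, state = (seen, score)
def pvLoopB (saD : PySem.Dict String String) (akD : PySem.Dict String String) :
    List String → PySem.Set Int × Int → PySem.Set Int × Int
  | [], st => st
  | label :: rest, st =>
      pvLoopB saD akD rest
        (match pvParseQ label with
         | some q =>
           if PySem.Set.contains st.1 q then st
           else (PySem.Set.add st.1 q, st.2 + pvScore1 saD akD q)
         | none => st)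

def score_debug_alt (student_answers : List (String × String)) (answer_key : List (String × String)) : Int :=
  (pvLoopB (PySem.Dict.ofList student_answers) (PySem.Dict.ofList answer_key)
    (PySem.Dict.ofList answer_key).keys (PySem.Set.empty, 0)).2

-- ===== PRECONDITION & SPEC =====
def Spec_score_debug (student_answers : List (String × String)) (answer_key : List (String × String)) (out : Int) : Prop := out = score_debug_alt student_answers answer_key
instance (student_answers : List (String × String)) (answer_key : List (String × String)) (out : Int) : Decidable (Spec_score_debug student_answers answer_key out) := by unfold Spec_score_debug; infer_instance

-- ===== CLAIM (what is proved, stated in full; the proofs are below) =====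
def Claim_equal_score_debug : Prop := ∀ (student_answers : List (String × String)) (answer_key : List (String × String)), Dom_score_debug student_answers answer_key → Spec_score_debug student_answers answer_key (score_debug student_answers answer_key)

-- ===== LEMMAS AND PROOFS =====

-- A's set-building loop is Set.update with the parsed question numbers
theorem pv_qNumsA_eq (l : List String) (s : PySem.Set Int) :
    pvQNumsA l s = PySem.Set.update s (l.filterMap pvParseQ) := by
  induction l generalizing s with
  | nil => simp [pvQNumsA, PySem.Set.update_nil]
  | cons a l ih =>
    cases h : pvParseQ a <;>
      simp [pvQNumsA, h, ih, PySem.Set.update_cons]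

-- A's scoring body adds exactly B's per-question points
theorem pv_stepA_eq (saD akD : PySem.Dict String String) (sc q : Int) :
    (let error_key := pvFstring q "_ERROR"
     let output_key := pvFstring q "_OUTPUT"
     let sc := if akD.contains error_key && saD.contains error_key then
         (if pvFuzzy (saD.getD error_key "") (akD.getD error_key "") then sc + 1 else sc)
       else sc
     if akD.contains output_key && saD.contains output_key then
       (if pvFuzzy (saD.getD output_key "") (akD.getD output_key "") then sc + 2 else sc)
     else sc)
    = sc + pvScore1 saD akD q := by
  simp only [pvScore1]
  split_ifs <;> simp_all <;> omega

-- A's second loop sums B's per-question points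
theorem pv_scoreLoopA_eq (saD akD : PySem.Dict String String) (qs : List Int) (sc : Int) :
    pvScoreLoopA saD akD qs sc = sc + (qs.map (pvScore1 saD akD)).sum := by
  induction qs generalizing sc with
  | nil => simp [pvScoreLoopA]
  | cons q rest ih =>
    rw [pvScoreLoopA, ih, List.map_cons, List.sum_cons]
    have h := pv_stepA_eq saD akD sc q
    dsimp only at h ⊢
    rw [h]
    ring

-- B's single pass: the seen set becomes Set.update, the score collects each new number's points
theorem pv_loopB_eq (saD akD : PySem.Dict String String) (l : List String)
    (seen : PySem.Set Int) (sc : Int) :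
    pvLoopB saD akD l (seen, sc)
    = (PySem.Set.update seen (l.filterMap pvParseQ),
       sc + (((PySem.Set.update seen (l.filterMap pvParseQ)).drop seen.length).map
              (pvScore1 saD akD)).sum) := by
  induction l generalizing seen sc with
  | nil => simp [pvLoopB, PySem.Set.update_nil, List.drop_length]
  | cons a l ih =>
    cases h : pvParseQ a with
    | none =>
      rw [pvLoopB]
      simp only [h, List.filterMap_cons]
      exact ih seen sc
    | some q =>
      by_cases hq : q ∈ seen
      · have hc : PySem.Set.contains seen q = true := by
          simp [PySem.Set.contains_eq_listContains]; exact hq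
        rw [pvLoopB]
        simp only [h, List.filterMap_cons, hc, PySem.Set.update_cons,
          PySem.Set.add_of_mem hq, if_true]
        exact ih seen sc
      · have hc : PySem.Set.contains seen q = false := by
          simp [PySem.Set.contains_eq_listContains]; exact hq
        rw [pvLoopB]
        simp only [h, List.filterMap_cons, hc, Bool.false_eq_true, if_false,
          PySem.Set.update_cons]
        rw [ih (PySem.Set.add seen q) (sc + pvScore1 saD akD q)]
        rw [PySem.Set.add_of_not_mem hq]
        rw [PySem.Set.update_eq_append_filter (seen ++ [q]) (l.filterMap pvParseQ)]
        have hassoc : seen ++ [q] ++ List.filter (fun y => !(seen ++ [q]).contains y)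
            (PySem.Set.ofList (l.filterMap pvParseQ))
            = seen ++ ([q] ++ List.filter (fun y => !(seen ++ [q]).contains y)
            (PySem.Set.ofList (l.filterMap pvParseQ))) := by
          rw [List.append_assoc]
        simp only [Prod.mk.injEq]
        refine ⟨trivial, ?_⟩
        rw [List.drop_left]
        rw [hassoc, List.drop_left]
        simp [List.map_cons, List.sum_cons]
        ring

-- both programs compute the sum of pvScore1 over the distinct parsed question numbers
theorem score_debug_eq_alt (student_answers answer_key : List (String × String)) :
    score_debug student_answers answer_key = score_debug_alt student_answers answer_key := by
  unfold score_debug score_debug_alt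
  rw [pv_qNumsA_eq, PySem.Set.update_empty, pv_scoreLoopA_eq, pv_loopB_eq]
  have hperm := ((PySem.List.sorted_perm
      (PySem.Set.ofList ((PySem.Dict.ofList answer_key).keys.filterMap pvParseQ))
      (fun x => x) false).map
      (pvScore1 (PySem.Dict.ofList student_answers) (PySem.Dict.ofList answer_key)))
  simp only [PySem.Set.empty, PySem.Set.update_nil_left, List.drop_zero, List.length_nil]
  rw [hperm.sum_eq]

-- ===== VERDICT (by name: the statement is the Claim_ definition above) =====
theorem score_debug_spec : Claim_equal_score_debug := by
  intro student_answers answer_key _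
  unfold Spec_score_debug
  exact score_debug_eq_alt student_answers answer_key
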